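-- pv_equiv track=rewrite | github.com/gahjelle/advent_of_code | python/src/2017/03_spiral_memory/aoc201703.py | spiral_to_xy
-- ===== SOURCE A (Python) =====
-- import math
--
-- def spiral_to_xy(index):
--     """Convert spiral index to xy-coordinates.
--
--     >>> spiral_to_xy(1)
--     (0, 0)
--
--     >>> spiral_to_xy(2)
--     (1, 0)
--
--     >>> spiral_to_xy(3)
--     (1, 1)
--
--     >>> spiral_to_xy(6)
--     (-1, 0)
--
--     >>> spiral_to_xy(22)
--     (-1, -2)
--
--     >>> spiral_to_xy(25)
--     (2, -2)
--     """
--     spiral = (1 + math.isqrt(index - 1)) // 2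
--
--     corner_idx = (2 * spiral - 1) ** 2
--     corner_xy = spiral - spiral * 1j
--     direction = 1j
--
--     while index > corner_idx + 2 * spiral:
--         corner_idx += 2 * spiral
--         corner_xy += 2 * spiral * direction
--         direction *= 1j
--
--     xy = corner_xy + (index - corner_idx) * direction
--     return int(xy.real), int(xy.imag)
-- ===== SOURCE B (Python) =====
-- import math
--
-- def spiral_to_xy(index):
--     """Closed-form: ring r, offset p into the ring, side and position on the side."""
--     r = (1 + math.isqrt(index - 1)) // 2
--     if r == 0:
--         return (0, 0)
--     p = index - (2 * r - 1) ** 2 - 1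
--     side, pos = divmod(p, 2 * r)
--     if side == 0:
--         return (r, pos + 1 - r)
--     if side == 1:
--         return (r - pos - 1, r)
--     if side == 2:
--         return (-r, r - pos - 1)
--     return (pos + 1 - r, -r)
-- ===== Notes on version B (the rewrite author's own statement) =====
-- stated objective: simpler
-- what changed: Replaces A's complex-number corner walk (a while loop stepping around the ring with a rotating direction) by a loop-free closed form: ring number, offset into the ring, then side = p // (2r) and position p % (2r) with one direct per-side coordinate formula.
-- outside the precondition, e.g. on spiral_to_xy(0): A raises ValueError, B raises ValueError
import Mathlib
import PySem

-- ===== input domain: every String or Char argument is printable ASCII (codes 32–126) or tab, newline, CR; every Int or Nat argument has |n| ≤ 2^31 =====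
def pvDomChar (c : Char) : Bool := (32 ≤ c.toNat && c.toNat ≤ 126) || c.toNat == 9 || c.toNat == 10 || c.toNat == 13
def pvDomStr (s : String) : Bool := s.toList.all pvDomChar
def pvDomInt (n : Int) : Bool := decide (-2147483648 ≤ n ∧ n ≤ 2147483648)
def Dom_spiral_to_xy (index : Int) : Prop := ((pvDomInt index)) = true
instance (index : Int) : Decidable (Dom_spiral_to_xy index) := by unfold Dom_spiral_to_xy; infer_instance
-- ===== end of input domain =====

-- B replaces A's complex-number walk around the ring corners by a direct per-side closed form
-- (ring, side, position), with no loop; objective: simpler.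

-- ===== PORT A =====
-- A's complex numbers hold small Gaussian integers throughout (exact in floats on the admitted
-- domain), so the port carries them exactly as (re, im) integer pairs; the while-loop runs at
-- most 3 times (proved below), so fuel 4 only makes the recursion total.
def spiralLoopA (index spiral : Int) : Nat → Int × Int × Int × Int × Int → Int × Int × Int × Int × Int
  | 0, st => st
  | f+1, (ci, cx, cy, dx, dy) =>
    if ci + 2 * spiral < index then
      -- corner_idx += 2*spiral; corner_xy += 2*spiral*direction; direction *= 1j
      spiralLoopA index spiral f (ci + 2*spiral, cx + 2*spiral*dx, cy + 2*spiral*dy, -dy, dx)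
    else (ci, cx, cy, dx, dy)

def spiral_to_xy (index : Int) : Int × Int :=
  let spiral := PySem.Int.floordiv (1 + Int.sqrt (index - 1)) 2
  -- corner_xy = spiral - spiral*1j ; direction = 1j
  let st := spiralLoopA index spiral 4 ((2*spiral - 1)^2, spiral, -spiral, 0, 1)
  (st.2.1 + (index - st.1) * st.2.2.2.1, st.2.2.1 + (index - st.1) * st.2.2.2.2)

-- ===== PORT B =====
def spiral_to_xy_alt (index : Int) : Int × Int :=
  let r := PySem.Int.floordiv (1 + Int.sqrt (index - 1)) 2
  if r = 0 then (0, 0)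
  else
    let p := index - (2*r - 1)^2 - 1
    let side := PySem.Int.floordiv p (2*r)
    let pos := PySem.Int.mod p (2*r)
    if side = 0 then (r, pos + 1 - r)
    else if side = 1 then (r - pos - 1, r)
    else if side = 2 then (-r, r - pos - 1)
    else (pos + 1 - r, -r)

-- ===== PRECONDITION & SPEC =====
-- A raises ValueError (math.isqrt of a negative number) for index ≤ 0; exactly those are excluded.
def Pre_spiral_to_xy (index : Int) : Prop := 1 ≤ index
instance (index : Int) : Decidable (Pre_spiral_to_xy index) := by unfold Pre_spiral_to_xy; infer_instance
def pvWitness_spiral_to_xy : Int := 10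

def Spec_spiral_to_xy (index : Int) (out : Int × Int) : Prop := out = spiral_to_xy_alt index
instance (index : Int) (out : Int × Int) : Decidable (Spec_spiral_to_xy index out) := by unfold Spec_spiral_to_xy; infer_instance

-- ===== CLAIM (what is proved, stated in full; the proofs are below) =====
def Claim_equal_spiral_to_xy : Prop := ∀ (index : Int), Dom_spiral_to_xy index → Pre_spiral_to_xy index → Spec_spiral_to_xy index (spiral_to_xy index)

-- ===== LEMMAS AND PROOFS =====

-- isqrt bracket: for 0 ≤ n, (√n)² ≤ n < (√n + 1)²
theorem int_sqrt_bracket (n : Int) (hn : 0 ≤ n) :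
    Int.sqrt n ^ 2 ≤ n ∧ n < (Int.sqrt n + 1) ^ 2 := by
  have hcast : ((n.toNat : Int)) = n := Int.toNat_of_nonneg hn
  have h1 := Nat.sqrt_le' n.toNat
  have h2 := Nat.lt_succ_sqrt' n.toNat
  zify at h1 h2
  rw [hcast] at h1 h2
  unfold Int.sqrt
  exact ⟨h1, by push_cast at h2 ⊢; linarith⟩

theorem main_eq (index : Int) (hpre : 1 ≤ index) :
    spiral_to_xy index = spiral_to_xy_alt index := by
  have h0 : (0:Int) ≤ index - 1 := by omega
  obtain ⟨hlo, hhi⟩ := int_sqrt_bracket (index - 1) h0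
  set s0 := Int.sqrt (index - 1) with hs0
  have hs0nn : 0 ≤ s0 := Int.sqrt_nonneg _
  have hfd : PySem.Int.floordiv (1 + s0) 2 = (1 + s0) / 2 :=
    PySem.Int.floordiv_eq_ediv_of_pos (by omega)
  set s := (1 + s0) / 2 with hs
  have hsb1 : 2 * s - 1 ≤ s0 := by omega
  have hsb2 : s0 ≤ 2 * s := by omega
  have hsnn : 0 ≤ s := by omega
  have hring_hi : index ≤ (2*s + 1)^2 := by nlinarith [hsb2, hhi, hs0nn]
  by_cases hz : s = 0
  · -- ring 0: index = 1
    have h1 : index = 1 := by rw [hz] at hring_hi; omega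
    subst h1
    simp only [spiral_to_xy, spiral_to_xy_alt]
    rw [hfd, hz]
    decide
  · have hspos : 0 < s := lt_of_le_of_ne hsnn (Ne.symm hz)
    have hring_lo : (2*s - 1)^2 < index := by nlinarith [hsb1, hlo, hspos]
    set p := index - (2*s - 1)^2 - 1 with hp
    have hpnn : 0 ≤ p := by omega
    have hplt : p < 8 * s := by nlinarith [hring_hi]
    have hfd2 : PySem.Int.floordiv p (2*s) = p / (2*s) :=
      PySem.Int.floordiv_eq_ediv_of_pos (by omega)
    have hmd2 : PySem.Int.mod p (2*s) = p % (2*s) :=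
      PySem.Int.mod_eq_emod_of_pos (by omega)
    set q := p / (2*s) with hq
    set m := p % (2*s) with hm
    have hdecomp : 2*s * q + m = p := Int.ediv_add_emod p (2*s)
    have hmnn : 0 ≤ m := Int.emod_nonneg p (by omega)
    have hmlt : m < 2*s := Int.emod_lt_of_pos p (by omega)
    have hqnn : 0 ≤ q := Int.ediv_nonneg hpnn (by omega)
    have hqlt : q < 4 := by
      by_contra h
      push_neg at h
      have h4 : s * 4 ≤ s * q := mul_le_mul_of_nonneg_left h (le_of_lt hspos)
      nlinarith [hdecomp, hplt, hmnn]
    simp only [spiral_to_xy, spiral_to_xy_alt]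
    rw [hfd, if_neg hz, ← hp, hfd2, hmd2]
    clear_value m q p s s0
    clear hq hm hfd hfd2 hmd2 hs0 hs hlo hhi hsb1 hsb2 hring_hi hs0nn h0
    generalize hc : (2*s - 1)^2 = c at hp hring_lo ⊢
    interval_cases q <;>
      simp only [spiralLoopA] <;>
      split_ifs <;>
      simp only [Prod.mk.injEq, mul_zero, mul_one, mul_neg, add_zero, neg_zero,
        neg_neg, true_and, and_true] <;>
      omega

-- ===== VERDICT (by name: the statement is the Claim_ definition above) =====
theorem spiral_to_xy_spec : Claim_equal_spiral_to_xy := by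
  intro index _ hpre
  unfold Spec_spiral_to_xy
  exact main_eq index hpre
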